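-- pv_equiv track=rewrite | github.com/jedlickap/miRNA_analysis | exactMiRnaPosInTe.py | antisenseRecalc
-- ===== SOURCE A (Python) =====
-- def antisenseRecalc(teDict):
--     antiFragList = list(teDict.keys())
--     antiFragList.reverse()
--     coordList = []
--     for k in teDict.keys():
--         coordList.append(teDict[k][1])
--         coordList.append(teDict[k][0])
--     teNewDict = {}
--
--     for i in range(len(antiFragList)):
--         if i == 0:
--             teNewDict[antiFragList[i]] = []
--             teNewDict[antiFragList[i]].append(1)
--             teNewDict[antiFragList[i]].append(1 + (coordList[0] - coordList[1]))
--             lastValue = teNewDict[antiFragList[i]][1]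
--             del coordList[0]
--         elif len(coordList) != 3:
--             teNewDict[antiFragList[i]] = []
--             teNewDict[antiFragList[i]].append((coordList[0] - coordList[1]) + lastValue)
--             teNewDict[antiFragList[i]].append((coordList[1] - coordList[2]) + teNewDict[antiFragList[i]][0])
--             lastValue = teNewDict[antiFragList[i]][1]
--             del coordList[0]
--             del coordList[0]
--         else:
--             teNewDict[antiFragList[i]] = []
--             teNewDict[antiFragList[i]].append((coordList[0] - coordList[1]) + lastValue)
--             teNewDict[antiFragList[i]].append((coordList[1] - coordList[2]) + teNewDict[antiFragList[i]][0])
--     teDict = teNewDict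
--     return teDict
-- ===== SOURCE B (Python) =====
-- def antisenseRecalc(teDict):
--     keys = list(teDict.keys())
--     coords = []
--     for k in keys:
--         coords += [teDict[k][1], teDict[k][0]]
--     if not keys:
--         return {}
--     base = coords[0]
--     vals = [1 + base - c for c in coords]
--     pairs = list(zip(vals[0::2], vals[1::2]))
--     return {k: [hi, lo] for k, (hi, lo) in zip(reversed(keys), pairs)}
-- ===== Notes on version B (the rewrite author's own statement) =====
-- stated objective: faster
-- what changed: Replaces A's stateful reverse loop (i==0 / len==3 branches, running lastValue, in-place del coordList[0]) by the closed form value 1+base-coord mapped once over the coordinate list, paired up and zipped with the reversed keys.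
import Mathlib
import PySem

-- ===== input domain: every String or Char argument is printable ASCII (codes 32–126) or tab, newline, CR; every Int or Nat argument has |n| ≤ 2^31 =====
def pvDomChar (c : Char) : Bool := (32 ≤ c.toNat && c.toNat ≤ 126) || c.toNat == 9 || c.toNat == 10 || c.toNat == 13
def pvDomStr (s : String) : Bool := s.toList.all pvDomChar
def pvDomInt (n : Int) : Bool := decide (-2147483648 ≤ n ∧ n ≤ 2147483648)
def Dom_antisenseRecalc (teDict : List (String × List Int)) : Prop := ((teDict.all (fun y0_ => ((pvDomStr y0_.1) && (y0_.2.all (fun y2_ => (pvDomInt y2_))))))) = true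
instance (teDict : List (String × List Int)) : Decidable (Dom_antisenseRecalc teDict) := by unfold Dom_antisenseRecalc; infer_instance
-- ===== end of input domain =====

-- B replaces A's stateful reverse loop (running lastValue, in-place deletions from
-- coordList, i==0 / len==3 branches) by the closed form 1+base-coord mapped once over
-- the coordinate list and zipped with the reversed keys; objective: simpler.

-- ===== PORT A =====
-- coordList: for k in teDict.keys(): append teDict[k][1]; append teDict[k][0]
-- (teDict[k] and the [0]/[1] indexing cannot fail under Pre_; .getD defaults are dead there)
def pvCoordsA (d : PySem.Dict String (List Int)) : List Int :=
  (PySem.Dict.keys d).foldl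
    (fun acc k =>
      let v := (PySem.Dict.get? d k).getD []
      acc ++ [((PySem.List.pyGet? v 1).getD 0), ((PySem.List.pyGet? v 0).getD 0)]) []

-- the 'for i in range(len(antiFragList))' loop of A: state = (coordList, lastValue,
-- teNewDict); isFirst tracks i == 0; 'del coordList[0]' = drop 1
def pvLoopA : List String → List Int → Int → PySem.Dict String (List Int) → Bool →
    PySem.Dict String (List Int)
  | [], _, _, acc, _ => acc
  | k :: rest, cl, last, acc, isFirst =>
    if isFirst then
      let v2 : Int := 1 + (((PySem.List.pyGet? cl 0).getD 0) - ((PySem.List.pyGet? cl 1).getD 0))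
      pvLoopA rest (cl.drop 1) v2 (PySem.Dict.insert acc k [1, v2]) false
    else if cl.length ≠ 3 then
      let v1 : Int := (((PySem.List.pyGet? cl 0).getD 0) - ((PySem.List.pyGet? cl 1).getD 0)) + last
      let v2 : Int := (((PySem.List.pyGet? cl 1).getD 0) - ((PySem.List.pyGet? cl 2).getD 0)) + v1
      pvLoopA rest ((cl.drop 1).drop 1) v2 (PySem.Dict.insert acc k [v1, v2]) false
    else
      let v1 : Int := (((PySem.List.pyGet? cl 0).getD 0) - ((PySem.List.pyGet? cl 1).getD 0)) + last
      let v2 : Int := (((PySem.List.pyGet? cl 1).getD 0) - ((PySem.List.pyGet? cl 2).getD 0)) + v1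
      pvLoopA rest cl v2 (PySem.Dict.insert acc k [v1, v2]) false

def antisenseRecalc (teDict : List (String × List Int)) : List (String × List Int) :=
  let d := PySem.Dict.ofList teDict
  let antiFragList := (PySem.Dict.keys d).reverse
  let coordList := pvCoordsA d
  (pvLoopA antiFragList coordList 0 PySem.Dict.empty true).items

-- ===== PORT B =====
-- pairs = zip(vals[0::2], vals[1::2])
def pvPairUp : List Int → List (Int × Int)
  | a :: b :: rest => (a, b) :: pvPairUp rest
  | _ => []

def antisenseRecalc_alt (teDict : List (String × List Int)) : List (String × List Int) :=
  let d := PySem.Dict.ofList teDict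
  let keys := PySem.Dict.keys d
  let coords := keys.foldl
    (fun acc k =>
      let v := (PySem.Dict.get? d k).getD []
      acc ++ [((PySem.List.pyGet? v 1).getD 0), ((PySem.List.pyGet? v 0).getD 0)]) []
  if keys.isEmpty then [] else
    let base := (PySem.List.pyGet? coords 0).getD 0
    let vals := coords.map (fun c => 1 + base - c)
    let pairs := pvPairUp vals
    ((keys.reverse.zip pairs).foldl
      (fun acc kp => PySem.Dict.insert acc kp.1 [kp.2.1, kp.2.2]) PySem.Dict.empty).items

-- ===== PRECONDITION & SPEC =====
-- Pre_ excludes exactly the inputs where A raises IndexError: some value list of the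
-- dict has fewer than 2 elements (teDict[k][1] / teDict[k][0] fails).
def Pre_antisenseRecalc (teDict : List (String × List Int)) : Prop :=
  ∀ k ∈ PySem.Dict.keys (PySem.Dict.ofList teDict),
    2 ≤ ((PySem.Dict.get? (PySem.Dict.ofList teDict) k).getD []).length
instance (teDict : List (String × List Int)) : Decidable (Pre_antisenseRecalc teDict) := by
  unfold Pre_antisenseRecalc; infer_instance

def pvWitness_antisenseRecalc : (List (String × List Int)) := [("a", [3, 7]), ("b", [10, 14])]

def Spec_antisenseRecalc (teDict : List (String × List Int)) (out : List (String × List Int)) : Prop := out = antisenseRecalc_alt teDict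
instance (teDict : List (String × List Int)) (out : List (String × List Int)) : Decidable (Spec_antisenseRecalc teDict out) := by unfold Spec_antisenseRecalc; infer_instance

-- ===== CLAIM (what is proved, stated in full; the proofs are below) =====
def Claim_equal_antisenseRecalc : Prop := ∀ (teDict : List (String × List Int)), Dom_antisenseRecalc teDict → Pre_antisenseRecalc teDict → Spec_antisenseRecalc teDict (antisenseRecalc teDict)

-- ===== LEMMAS AND PROOFS =====

-- evaluating xs[0], xs[1], xs[2] on cons literals
theorem pvPg0 (x : Int) (xs : List Int) : (PySem.List.pyGet? (x :: xs) 0).getD 0 = x := by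
  rw [PySem.List.pyGet?_zero_cons]; rfl

theorem pvPg1 (x y : Int) (xs : List Int) :
    (PySem.List.pyGet? (x :: y :: xs) 1).getD 0 = y := by
  rw [show ((1:Int)) = ((1:Nat):Int) from rfl, PySem.List.pyGet?_natCast]; rfl

theorem pvPg2 (x y z : Int) (xs : List Int) :
    (PySem.List.pyGet? (x :: y :: z :: xs) 2).getD 0 = z := by
  rw [show ((2:Int)) = ((2:Nat):Int) from rfl, PySem.List.pyGet?_natCast]; rfl

-- A's loop after the first iteration equals B's fold over zip, given the length
-- invariant and last = 1 + base - (head of coordList).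
theorem pvLoopA_eq_fold (r : List String) : ∀ (c : Int) (cs : List Int) (base : Int)
    (acc : PySem.Dict String (List Int)), cs.length = 2 * r.length →
    pvLoopA r (c :: cs) (1 + base - c) acc false
      = ((r.zip (pvPairUp (cs.map (fun x => 1 + base - x)))).foldl
          (fun acc kp => PySem.Dict.insert acc kp.1 [kp.2.1, kp.2.2]) acc) := by
  induction r with
  | nil =>
    intro c cs base acc h
    match cs, h with
    | [], _ => simp [pvLoopA, pvPairUp]
  | cons k rest ih =>
    intro c cs base acc h
    match cs, h with
    | a :: b :: cs', h =>
      simp only [List.length_cons] at h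
      have hcs' : cs'.length = 2 * rest.length := by omega
      rw [pvLoopA]
      rw [if_neg Bool.false_ne_true]
      cases rest with
      | nil =>
        match cs', hcs' with
        | [], _ =>
          rw [if_neg (by simp : ¬((c :: a :: b :: ([] : List Int)).length ≠ 3))]
          rw [pvPg0, pvPg1, pvPg2]
          rw [pvLoopA]
          have hv1 : (c - a) + (1 + base - c) = 1 + base - a := by ring
          rw [hv1]
          have hv2 : (a - b) + (1 + base - a) = 1 + base - b := by ring
          rw [hv2]
          simp only [List.map_cons, List.map_nil, pvPairUp, List.zip_cons_cons,
            List.zip_nil_right, List.foldl_cons, List.foldl_nil]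
      | cons k2 rest2 =>
        have hcs2 : cs'.length = 2 * rest2.length + 2 := by
          simp only [List.length_cons] at hcs'; omega
        rw [if_pos (by simp only [List.length_cons]; omega :
          (c :: a :: b :: cs').length ≠ 3)]
        rw [pvPg0, pvPg1, pvPg2]
        have hv1 : (c - a) + (1 + base - c) = 1 + base - a := by ring
        rw [hv1]
        simp only [List.drop]
        have hv2 : (a - b) + (1 + base - a) = 1 + base - b := by ring
        rw [hv2]
        rw [ih b cs' base _ hcs']
        simp [pvPairUp, List.zip_cons_cons]

-- length of the coordinate list built per key
theorem pvFlat_len {α : Type} (f g : α → Int) (ks : List α) :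
    (ks.flatMap (fun k => [f k, g k])).length = 2 * ks.length := by
  induction ks with
  | nil => rfl
  | cons k ks ih => simp [List.flatMap_cons, ih]; omega

theorem pvCoordsA_eq (d : PySem.Dict String (List Int)) :
    pvCoordsA d = (PySem.Dict.keys d).flatMap
      (fun k => [((PySem.List.pyGet? ((PySem.Dict.get? d k).getD []) 1).getD 0),
                 ((PySem.List.pyGet? ((PySem.Dict.get? d k).getD []) 0).getD 0)]) := by
  unfold pvCoordsA
  rw [PySem.List.foldl_append_eq_flatMap]
  simp

theorem pvRev_nonempty {k0 : String} {krest : List String} :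
    ∃ r0 rtail, (k0 :: krest).reverse = r0 :: rtail ∧ rtail.length = krest.length := by
  cases hr : (k0 :: krest).reverse with
  | nil => exact absurd (congrArg List.length hr) (by simp)
  | cons r0 rtail =>
    refine ⟨r0, rtail, rfl, ?_⟩
    have := congrArg List.length hr
    simp at this; omega

-- ===== VERDICT (by name: the statement is the Claim_ definition above) =====
theorem antisenseRecalc_spec : Claim_equal_antisenseRecalc := by
  intro teDict _ _
  unfold Spec_antisenseRecalc antisenseRecalc antisenseRecalc_alt
  set d := PySem.Dict.ofList teDict with hd
  have hco : (PySem.Dict.keys d).foldl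
      (fun acc k =>
        let v := (PySem.Dict.get? d k).getD []
        acc ++ [((PySem.List.pyGet? v 1).getD 0), ((PySem.List.pyGet? v 0).getD 0)]) []
      = pvCoordsA d := rfl
  simp only [hco]
  cases hk : PySem.Dict.keys d with
  | nil =>
    simp [hk, pvCoordsA, pvLoopA, PySem.Dict.empty]
  | cons k0 krest =>
    set f1 : String → Int := fun k => ((PySem.List.pyGet? ((PySem.Dict.get? d k).getD []) 1).getD 0) with hf1
    set f0 : String → Int := fun k => ((PySem.List.pyGet? ((PySem.Dict.get? d k).getD []) 0).getD 0) with hf0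
    have hflat : pvCoordsA d = f1 k0 :: f0 k0 :: krest.flatMap (fun k => [f1 k, f0 k]) := by
      rw [pvCoordsA_eq d, hk, List.flatMap_cons]
      rfl
    set T := krest.flatMap (fun k => [f1 k, f0 k]) with hT
    have hTlen : T.length = 2 * krest.length := pvFlat_len f1 f0 krest
    obtain ⟨r0, rtail, hrev, hrlen⟩ := pvRev_nonempty (k0 := k0) (krest := krest)
    rw [hflat, hrev]
    -- A side: first iteration
    rw [pvLoopA, if_pos rfl]
    rw [pvPg0, pvPg1]
    have hlast : 1 + (f1 k0 - f0 k0) = 1 + f1 k0 - f0 k0 := by ring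
    simp only [List.drop]
    rw [hlast, pvLoopA_eq_fold rtail (f0 k0) T (f1 k0) _ (by omega)]
    -- B side
    rw [if_neg (by simp : ¬((k0 :: krest).isEmpty = true))]
    simp only [List.map_cons, pvPairUp, List.zip_cons_cons, List.foldl_cons]
    have hvals : [1 + f1 k0 - f1 k0, 1 + f1 k0 - f0 k0] = [(1 : Int), 1 + f1 k0 - f0 k0] := by
      norm_num
    rw [hvals]
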